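-- pv_equiv track=rewrite | github.com/SafonovVladimir/mornings | 02 february/20/1.py | capitals_first
-- ===== SOURCE A (Python) =====
-- def capitals_first(sentence: str) -> str:
--     upper_words = []
--     lower_words = []
--     sentence = sentence.split()
--     for i in range(len(sentence)):
--         if sentence[i][0].isupper():
--             upper_words.append(sentence[i])
--         else:
--             lower_words.append(sentence[i])
--
--     upper_words.extend(lower_words)
--     return " ".join(upper_words)
-- ===== SOURCE B (Python) =====
-- def capitals_first(sentence: str) -> str:
--     return " ".join(sorted(sentence.split(), key=lambda w: not w[0].isupper()))
-- ===== Notes on version B (the rewrite author's own statement) =====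
-- stated objective: idiomatic
-- what changed: Replaces the two explicit bucket lists and the index loop with a single stable sort keyed on whether the first character is not uppercase; stability preserves the relative order within each group.
import Mathlib
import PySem

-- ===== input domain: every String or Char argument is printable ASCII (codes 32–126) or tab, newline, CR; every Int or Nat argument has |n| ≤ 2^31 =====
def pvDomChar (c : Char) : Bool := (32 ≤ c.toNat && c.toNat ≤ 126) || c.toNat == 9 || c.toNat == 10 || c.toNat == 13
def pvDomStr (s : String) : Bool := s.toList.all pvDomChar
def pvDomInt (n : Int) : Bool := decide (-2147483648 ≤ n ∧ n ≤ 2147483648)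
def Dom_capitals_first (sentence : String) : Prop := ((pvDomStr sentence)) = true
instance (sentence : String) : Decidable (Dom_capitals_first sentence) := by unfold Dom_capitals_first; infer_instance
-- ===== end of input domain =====

-- B replaces A's two explicit bucket lists and index loop with one stable sort keyed on
-- "first character is not uppercase" (idiomatic; not claimed faster).

-- w[0].isupper() for a word w (split() never yields an empty word, so the none branch is unreachable)
def pvFirstUpper (w : List Char) : Bool :=
  match PySem.Chars.pyGet? w 0 with
  | some c => PySem.Chars.isupper c
  | none => false

-- ===== PORT A =====
def capitals_first (sentence : String) : String :=
  let ws := PySem.Chars.split₀ sentence.toList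
  let st := (PySem.List.pyRange 0 (PySem.List.len ws)).foldl
    (fun (st : List (List Char) × List (List Char)) i =>
      if pvFirstUpper (PySem.List.pyGetD ws i []) then
        (st.1 ++ [PySem.List.pyGetD ws i []], st.2)
      else
        (st.1, st.2 ++ [PySem.List.pyGetD ws i []]))
    ([], [])
  String.ofList (PySem.Chars.join [' '] (st.1 ++ st.2))

-- ===== PORT B =====
def capitals_first_alt (sentence : String) : String :=
  String.ofList (PySem.Chars.join [' ']
    (PySem.List.sorted (PySem.Chars.split₀ sentence.toList) (fun w => !pvFirstUpper w)))

-- ===== PRECONDITION & SPEC =====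
def Spec_capitals_first (sentence : String) (out : String) : Prop := out = capitals_first_alt sentence
instance (sentence : String) (out : String) : Decidable (Spec_capitals_first sentence out) := by unfold Spec_capitals_first; infer_instance

-- ===== CLAIM (what is proved, stated in full; the proofs are below) =====
def Claim_equal_capitals_first : Prop := ∀ (sentence : String), Dom_capitals_first sentence → Spec_capitals_first sentence (capitals_first sentence)

-- ===== LEMMAS AND PROOFS =====

-- inserting a key-false element lands at the boundary between the false block and the true block
lemma insertBy_false_between {α : Type} (before : α → α → Bool) (x : α) :
    ∀ (F T : List α), (∀ y ∈ F, before x y = false) → (∀ y ∈ T, before x y = true) →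
      PySem.List.insertBy before x (F ++ T) = F ++ [x] ++ T := by
  intro F
  induction F with
  | nil =>
    intro T _ hT
    cases T with
    | nil => simp [PySem.List.insertBy]
    | cons t ts => simp [PySem.List.insertBy, hT t (by simp)]
  | cons f fs ih =>
    intro T hF hT
    have h1 : before x f = false := hF f (by simp)
    simp only [List.cons_append, PySem.List.insertBy, h1]
    simp [ih T (fun y hy => hF y (by simp [hy])) hT]

-- the stable-insertion-sort fold by a Bool key keeps a "false block ++ true block" shape
lemma foldl_insertBy_bool {α : Type} (k : α → Bool) :
    ∀ (xs F T : List α), (∀ y ∈ F, k y = false) → (∀ y ∈ T, k y = true) →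
      xs.foldl (fun acc x => PySem.List.insertBy (fun a b => decide (k a < k b)) x acc) (F ++ T)
        = (F ++ xs.filter (fun x => !k x)) ++ (T ++ xs.filter k) := by
  intro xs
  induction xs with
  | nil => intro F T _ _; simp
  | cons x xs ih =>
    intro F T hF hT
    by_cases hx : k x = true
    · have hstep : PySem.List.insertBy (fun a b => decide (k a < k b)) x (F ++ T)
          = F ++ (T ++ [x]) := by
        rw [← List.append_assoc]
        apply PySem.List.insertBy_of_forall_not_before
        intro y _; rw [hx]; cases k y <;> decide
      simp only [List.foldl_cons, hstep]
      rw [ih F (T ++ [x]) hF (by intro y hy; rcases List.mem_append.1 hy with h | h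
                                 · exact hT y h
                                 · simp at h; simp [h, hx])]
      simp [hx]
    · have hx' : k x = false := by simpa using hx
      have hstep : PySem.List.insertBy (fun a b => decide (k a < k b)) x (F ++ T)
          = (F ++ [x]) ++ T := by
        rw [List.append_assoc]; rw [← List.append_assoc F [x] T]
        apply insertBy_false_between
        · intro y hy; rw [hx', hF y hy]; decide
        · intro y hy; rw [hx', hT y hy]; decide
      simp only [List.foldl_cons, hstep]
      rw [ih (F ++ [x]) T (by intro y hy; rcases List.mem_append.1 hy with h | h
                              · exact hF y h
                              · simp at h; simp [h, hx']) hT]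
      simp [hx']

-- sorted by a Bool key is exactly "false-key elements first, each group in original order"
lemma sorted_bool_eq_filter_append {α : Type} (k : α → Bool) (xs : List α) :
    PySem.List.sorted xs k = xs.filter (fun x => !k x) ++ xs.filter k := by
  rw [PySem.List.sorted_eq_foldl_insertBy]
  have := foldl_insertBy_bool k xs [] [] (by simp) (by simp)
  simpa using this

theorem capitals_first_spec : Claim_equal_capitals_first := by
  intro sentence _
  unfold Spec_capitals_first capitals_first capitals_first_alt
  simp only []
  set ws := PySem.Chars.split₀ sentence.toList with hws
  rw [show ((0 : Int)) = ((0 : Int)) from rfl]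
  rw [PySem.List.foldl_pyRange_pyGetD ws []
      (fun (st : List (List Char) × List (List Char)) w =>
        if pvFirstUpper w then (st.1 ++ [w], st.2) else (st.1, st.2 ++ [w]))
      ([], []) (by norm_num)]
  simp only [Int.toNat_zero, List.drop_zero]
  rw [sorted_bool_eq_filter_append (fun w => !pvFirstUpper w) ws]
  have hsplit : ws.foldl
      (fun (st : List (List Char) × List (List Char)) w =>
        if pvFirstUpper w then (st.1 ++ [w], st.2) else (st.1, st.2 ++ [w])) ([], [])
      = (ws.filter (fun w => pvFirstUpper w), ws.filter (fun w => !pvFirstUpper w)) := by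
    have hfun : (fun (st : List (List Char) × List (List Char)) w =>
        if pvFirstUpper w then (st.1 ++ [w], st.2) else (st.1, st.2 ++ [w]))
        = (fun st w => (if pvFirstUpper w then st.1 ++ [w] else st.1,
                        if !pvFirstUpper w then st.2 ++ [w] else st.2)) := by
      funext st w
      by_cases hw : pvFirstUpper w <;> simp [hw]
    rw [hfun,
      PySem.List.foldl_prod_mk
        (f := fun (acc : List (List Char)) (w : List Char) => if pvFirstUpper w then acc ++ [w] else acc)
        (g := fun (acc : List (List Char)) (w : List Char) => if !pvFirstUpper w then acc ++ [w] else acc)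
        ws [] [],
      PySem.List.foldl_append_if_eq_filter, PySem.List.foldl_append_if_eq_filter]
    simp
  rw [hsplit]
  simp
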